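-- pv_equiv track=rewrite | github.com/Sebaestschjin/advent-of-code | year2019/day08/solver.py | build_layers
-- ===== SOURCE A (Python) =====
-- def build_layers(input, width, height):
--     image_size = width * height
--     layer_count = len(input) // (width * height)
--     layers = []
--
--     for layer in range(layer_count):
--         start_image = layer * image_size
--         layer = []
--         for y in range(height):
--             start_row = start_image + y * width
--             row = input[start_row:(start_row + width)]
--             layer.append(row)
--
--         layers.append(layer)
--
--     return layers
-- ===== SOURCE B (Python) =====
-- def build_layers(input, width, height):
--     # Consume the string: bite a layer-sized prefix off the remainder, then bite
--     # width-sized row prefixes off that block; no index arithmetic anywhere.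
--     image_size = width * height
--     layers = []
--     rest = input
--     remaining_layers = len(input) // image_size
--     while remaining_layers > 0:
--         block, rest = rest[:image_size], rest[image_size:]
--         layer = []
--         rows_left = height
--         while rows_left > 0:
--             layer.append(block[:width])
--             block = block[width:]
--             rows_left -= 1
--         layers.append(layer)
--         remaining_layers -= 1
--     return layers
-- ===== Notes on version B (the rewrite author's own statement) =====
-- stated objective: alternative
-- what changed: B never computes slice offsets: it maintains the remaining string as loop state, biting a layer-sized prefix off it per layer and width-sized row prefixes off each block, where A indexes the original string with nested range loops and computed start offsets.
import Mathlib
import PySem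

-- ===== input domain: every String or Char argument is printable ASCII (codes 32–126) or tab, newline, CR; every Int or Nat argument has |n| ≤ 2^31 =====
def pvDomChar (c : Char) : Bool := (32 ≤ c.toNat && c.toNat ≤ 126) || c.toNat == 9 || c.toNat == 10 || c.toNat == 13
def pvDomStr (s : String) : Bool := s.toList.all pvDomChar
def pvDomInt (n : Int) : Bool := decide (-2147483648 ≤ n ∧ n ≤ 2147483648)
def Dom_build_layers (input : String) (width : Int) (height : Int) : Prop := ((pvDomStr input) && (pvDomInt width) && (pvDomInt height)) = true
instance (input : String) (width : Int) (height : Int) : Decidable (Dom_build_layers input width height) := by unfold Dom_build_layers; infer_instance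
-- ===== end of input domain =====

-- B consumes the input by repeatedly biting off layer- and row-sized prefixes of the
-- remaining string (no index arithmetic), instead of A's nested indexed-slice loops;
-- objective: alternative decomposition.


-- ===== PORT A =====
def build_layers (input : String) (width : Int) (height : Int) : List (List String) :=
  let image_size := width * height
  let layer_count := PySem.Int.floordiv (PySem.Str.len input) (width * height)
  (PySem.List.pyRange 0 layer_count 1).foldl (fun layers layer =>
    let start_image := layer * image_size
    layers ++ [(PySem.List.pyRange 0 height 1).foldl (fun lay y =>
      let start_row := start_image + y * width
      lay ++ [PySem.Str.slice input (some start_row) (some (start_row + width))]) []]) []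

-- ===== PORT B =====
-- inner while loop: bite width-sized row prefixes off the block, rows_left times
def pvRowsB (width : Int) (block : String) (rows_left : Int) (layer : List String) : List String :=
  if 0 < rows_left then
    pvRowsB width (PySem.Str.slice block (some width) none) (rows_left - 1)
      (layer ++ [PySem.Str.slice block none (some width)])
  else layer
termination_by rows_left.toNat
decreasing_by simp_wf; omega

-- outer while loop: bite a layer-sized prefix off the remaining string, k times
def pvPeelB (width height image_size : Int) (rest : String) (k : Int)
    (layers : List (List String)) : List (List String) :=
  if 0 < k then
    pvPeelB width height image_size (PySem.Str.slice rest (some image_size) none) (k - 1)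
      (layers ++ [pvRowsB width (PySem.Str.slice rest none (some image_size)) height []])
  else layers
termination_by k.toNat
decreasing_by simp_wf; omega

def build_layers_alt (input : String) (width : Int) (height : Int) : List (List String) :=
  let image_size := width * height
  pvPeelB width height image_size input
    (PySem.Int.floordiv (PySem.Str.len input) image_size) []

-- ===== PRECONDITION & SPEC =====
-- Pre_ excludes exactly width*height = 0, where Python A (and B) raise ZeroDivisionError.
def Pre_build_layers (input : String) (width : Int) (height : Int) : Prop := width * height ≠ 0
instance (input : String) (width : Int) (height : Int) : Decidable (Pre_build_layers input width height) := by unfold Pre_build_layers; infer_instance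

def pvWitness_build_layers : String × Int × Int := ("123456789012", 2, 3)

def Spec_build_layers (input : String) (width : Int) (height : Int) (out : List (List String)) : Prop := out = build_layers_alt input width height
instance (input : String) (width : Int) (height : Int) (out : List (List String)) : Decidable (Spec_build_layers input width height out) := by unfold Spec_build_layers; infer_instance

-- ===== CLAIM =====
def Claim_equal_build_layers : Prop := ∀ (input : String) (width : Int) (height : Int), Dom_build_layers input width height → Pre_build_layers input width height → Spec_build_layers input width height (build_layers input width height)

-- ===== LEMMAS AND PROOFS =====

-- a positive floor quotient with a nonnegative dividend forces a positive divisor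
lemma pos_divisor_of_pos_floordiv {a b : Int} (ha : 0 ≤ a) (hb : b ≠ 0)
    (h : 0 < PySem.Int.floordiv a b) : 0 < b := by
  by_contra hneg
  push Not at hneg
  have hblt : b < 0 := lt_of_le_of_ne hneg hb
  have hmod := PySem.Int.mod_neg_bounds a hblt
  have heq := PySem.Int.floordiv_mul_add_mod a b
  have : PySem.Int.floordiv a b * b ≤ 1 * b := by
    apply mul_le_mul_of_nonpos_right _ (le_of_lt hblt)
    omega
  omega

-- the inner bite-off loop yields the width-chunks of the block, by rows_left count
lemma pvRowsB_eq (wn : Nat) : ∀ (hn : Nat) (bs : String) (acc : List String),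
    pvRowsB (wn : Int) bs (hn : Int) acc
      = acc ++ (List.range hn).map (fun y => String.ofList ((bs.toList.drop (y * wn)).take wn)) := by
  intro hn
  induction hn with
  | zero => intro bs acc; rw [pvRowsB]; simp
  | succ n ih =>
    intro bs acc
    rw [pvRowsB, if_pos (by exact_mod_cast Nat.succ_pos n)]
    have hsub : ((n + 1 : Nat) : Int) - 1 = (n : Int) := by omega
    rw [hsub, ih]
    have hslice_from : (PySem.Str.slice bs (some (wn : Int)) none).toList = bs.toList.drop wn := by
      simp [PySem.Str.slice, PySem.List.slice_from_natCast]
    have hslice_to : PySem.Str.slice bs none (some (wn : Int))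
        = String.ofList (bs.toList.take wn) := by
      apply String.toList_inj.mp
      simp [PySem.Str.slice, PySem.List.slice_to_natCast]
    rw [List.range_succ_eq_map]
    simp only [List.map_cons, List.map_map, hslice_from, hslice_to]
    simp only [Nat.zero_mul, List.drop_zero, List.append_assoc, List.cons_append,
      List.nil_append]
    congr 1
    congr 1
    apply List.map_congr_left
    intro y _
    simp only [Function.comp, Nat.succ_eq_add_one]
    rw [List.drop_drop, Nat.succ_mul, Nat.add_comm (n := _) (m := wn)]

-- degenerate inner loop: a nonpositive row count yields the empty layer each time
lemma pvRowsB_nonpos (w : Int) (bs : String) (h : Int) (hh : h ≤ 0) (acc : List String) :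
    pvRowsB w bs h acc = acc := by
  rw [pvRowsB, if_neg (by omega)]

-- outer bite-off loop with nonpositive height: k empty layers
lemma pvPeelB_nonpos (w h ws : Int) (hh : h ≤ 0) : ∀ (k : Nat) (rest : String)
    (acc : List (List String)),
    pvPeelB w h ws rest (k : Int) acc = acc ++ List.replicate k [] := by
  intro k
  induction k with
  | zero => intro rest acc; rw [pvPeelB]; simp
  | succ n ih =>
    intro rest acc
    rw [pvPeelB, if_pos (by exact_mod_cast Nat.succ_pos n)]
    have hsub : ((n + 1 : Nat) : Int) - 1 = (n : Int) := by omega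
    rw [hsub, pvRowsB_nonpos _ _ _ hh, ih]
    simp [List.replicate_succ]

-- the outer bite-off loop yields the indexed reshape, for positive width and height
lemma pvPeelB_eq (wn hn : Nat) : ∀ (k : Nat) (rest : String) (acc : List (List String)),
    pvPeelB (wn : Int) (hn : Int) ((wn * hn : Nat) : Int) rest (k : Int) acc
      = acc ++ (List.range k).map (fun j => (List.range hn).map (fun y =>
          String.ofList ((rest.toList.drop (j * (wn * hn) + y * wn)).take wn))) := by
  intro k
  induction k with
  | zero => intro rest acc; rw [pvPeelB]; simp
  | succ n ih =>
    intro rest acc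
    rw [pvPeelB, if_pos (by exact_mod_cast Nat.succ_pos n)]
    have hsub : ((n + 1 : Nat) : Int) - 1 = (n : Int) := by omega
    rw [hsub, pvRowsB_eq wn hn, ih]
    have hbr : ∀ (a b : Option Int), (PySem.Str.slice rest a b).toList
        = PySem.List.slice rest.toList a b := by
      intro a b; simp [PySem.Str.slice]
    have hfrom : (PySem.Str.slice rest (some ((wn * hn : Nat) : Int)) none).toList
        = rest.toList.drop (wn * hn) := by
      rw [hbr, PySem.List.slice_from_natCast]
    have hto : (PySem.Str.slice rest none (some ((wn * hn : Nat) : Int))).toList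
        = rest.toList.take (wn * hn) := by
      rw [hbr, PySem.List.slice_to_natCast]
    rw [List.range_succ_eq_map]
    simp only [List.map_cons, List.map_map, hfrom, hto]
    simp only [List.nil_append, List.append_assoc, List.singleton_append]
    congr 1
    congr 1
    · -- first layer: rows of the taken block = rows of the string at offset 0
      apply List.map_congr_left
      intro y hy
      have hyl : y < hn := List.mem_range.mp hy
      congr 1
      rw [List.drop_take, List.take_take]
      simp only [Nat.zero_mul, Nat.zero_add]
      congr 1
      have : y * wn + wn ≤ wn * hn := by
        have : (y + 1) * wn ≤ hn * wn := Nat.mul_le_mul_right wn hyl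
        calc y * wn + wn = (y + 1) * wn := by ring
          _ ≤ hn * wn := this
          _ = wn * hn := Nat.mul_comm hn wn
      omega
    · -- remaining layers: offsets shift by one image size
      apply List.map_congr_left
      intro j _
      simp only [Function.comp, Nat.succ_eq_add_one]
      apply List.map_congr_left
      intro y _
      rw [List.drop_drop, Nat.succ_mul,
        show wn * hn + (j * (wn * hn) + y * wn) = j * (wn * hn) + wn * hn + y * wn from by ring]

-- ===== VERDICT =====
theorem build_layers_spec : Claim_equal_build_layers := by
  intro input width height _ hpre
  unfold Spec_build_layers build_layers build_layers_alt
  simp only [PySem.List.foldl_append_singleton_eq_map, List.nil_append]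
  set L := PySem.Int.floordiv (PySem.Str.len input) (width * height) with hLdef
  by_cases hL : L ≤ 0
  · -- no full layer: A's range is empty, B's loop exits immediately
    have houter : PySem.List.pyRange 0 L 1 = [] := by
      rw [PySem.List.pyRange_one]
      have h0 : (L - 0).toNat = 0 := by omega
      rw [h0]; rfl
    rw [houter, pvPeelB, if_neg (by omega)]
    rfl
  · push Not at hL
    have hlen : (0 : Int) ≤ PySem.Str.len input := by rw [PySem.Str.len_eq]; positivity
    have hwh : 0 < width * height := pos_divisor_of_pos_floordiv hlen hpre (hLdef ▸ hL)
    obtain ⟨Ln, hLn⟩ : ∃ Ln : Nat, L = (Ln : Int) := ⟨L.toNat, (Int.toNat_of_nonneg (le_of_lt hL)).symm⟩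
    by_cases hh : height ≤ 0
    · -- nonpositive height (width and height both negative): every layer is empty
      have hinner : PySem.List.pyRange 0 height 1 = [] := by
        rw [PySem.List.pyRange_one]
        have h0 : (height - 0).toNat = 0 := by omega
        rw [h0]; rfl
      rw [hLn, pvPeelB_nonpos _ _ _ hh, List.nil_append, PySem.List.pyRange_zero_natCast]
      simp [hinner, Function.comp_def]
    · push Not at hh
      have hw : 0 < width := by
        by_contra hwn
        push Not at hwn
        nlinarith
      obtain ⟨wn, hwn⟩ : ∃ wn : Nat, width = (wn : Int) := ⟨width.toNat, (Int.toNat_of_nonneg (le_of_lt hw)).symm⟩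
      obtain ⟨hnn, hhn⟩ : ∃ hnn : Nat, height = (hnn : Int) := ⟨height.toNat, (Int.toNat_of_nonneg (le_of_lt hh)).symm⟩
      subst hwn hhn
      rw [hLn]
      rw [show ((wn : Int) * (hnn : Int)) = ((wn * hnn : Nat) : Int) from by push_cast; ring]
      rw [pvPeelB_eq wn hnn Ln input [], List.nil_append]
      simp only [PySem.List.pyRange_zero_natCast, List.map_map]
      apply List.map_congr_left
      intro j _
      simp only [Function.comp_def]
      apply List.map_congr_left
      intro y _
      apply String.toList_inj.mp
      have hbr : ∀ (a b : Option Int), (PySem.Str.slice input a b).toList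
          = PySem.List.slice input.toList a b := by
        intro a b; simp [PySem.Str.slice]
      rw [hbr]
      rw [show ((j : Int) * ((wn * hnn : Nat) : Int) + (y : Int) * (wn : Int))
          = ((j * (wn * hnn) + y * wn : Nat) : Int) from by push_cast; ring]
      rw [show ((j * (wn * hnn) + y * wn : Nat) : Int) + (wn : Int)
          = ((j * (wn * hnn) + y * wn : Nat) : Int) + ((wn : Nat) : Int) from rfl]
      rw [PySem.List.slice_natCast_add, String.toList_ofList]
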